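-- pv_equiv track=rewrite | github.com/DShakirov/CodeWars | codewars-5-kyu-is-my-friend-cheating.py | remov_nb
-- ===== SOURCE A (Python) =====
-- def remov_nb(n):
--     result = []
--     summ = n*(n+1)//2
--     for x in range(1, n + 1):
--         y = (summ - x) // (x + 1)
--         if y <= n and x * y == (summ - x - y):
--             result.append((x, y))
--     return result
-- ===== SOURCE B (Python) =====
-- def remov_nb(n):
--     # Divisor-pair enumeration: (x+1)*(y+1) = S where S = n*(n+1)//2 + 1.
--     # Scan d = 1 .. isqrt(S); each divisor d of S yields the pair (d, S//d).
--     # Small halves give ascending x directly; mirrored halves are collected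
--     # and reversed, so the result is in ascending x without sorting.
--     # Both emission branches need d <= n+1, so the scan also stops there.
--     S = n * (n + 1) // 2 + 1
--     small, big = [], []
--     d = 1
--     while d * d <= S and d <= n + 1:
--         if S % d == 0:
--             q = S // d
--             if 2 <= d <= n + 1 and q <= n + 1:
--                 small.append((d - 1, q - 1))
--             if q != d and 2 <= q <= n + 1 and d <= n + 1:
--                 big.append((q - 1, d - 1))
--         d += 1
--     return small + big[::-1]
-- ===== Notes on version B (the rewrite author's own statement) =====
-- stated objective: alternative
-- what changed: B enumerates divisor pairs of S = n*(n+1)//2 + 1 only up to sqrt(S) using the factorisation (x+1)*(y+1) = S, emitting each small divisor and its mirrored cofactor into two lists and concatenating the first with the reverse of the second, instead of A's full scan over x in 1..n solving for y each time; intended as faster (fewer iterations), measured ~1.4x at the largest size, below the 1.5x bar.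
import Mathlib
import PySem

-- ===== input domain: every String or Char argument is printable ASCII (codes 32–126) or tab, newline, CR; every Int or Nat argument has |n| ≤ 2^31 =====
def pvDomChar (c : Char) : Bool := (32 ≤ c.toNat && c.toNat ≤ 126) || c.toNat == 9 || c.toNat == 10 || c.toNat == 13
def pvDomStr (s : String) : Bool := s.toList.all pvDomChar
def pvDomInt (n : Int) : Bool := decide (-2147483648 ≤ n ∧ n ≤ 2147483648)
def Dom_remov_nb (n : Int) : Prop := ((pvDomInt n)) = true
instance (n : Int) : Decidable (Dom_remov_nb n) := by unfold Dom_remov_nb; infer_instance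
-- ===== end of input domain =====

-- B enumerates divisor pairs of S = n*(n+1)//2 + 1 only up to sqrt(S) via (x+1)*(y+1) = S,
-- emitting each small divisor and its mirrored cofactor; A scans every x in 1..n.

-- ===== PORT A =====
def remov_nb (n : Int) : List (Int × Int) :=
  let summ := PySem.Int.floordiv (n * (n + 1)) 2
  (PySem.List.pyRange 1 (n + 1) 1).foldl (fun result x =>
    let y := PySem.Int.floordiv (summ - x) (x + 1)
    if y ≤ n ∧ x * y = summ - x - y then result ++ [(x, y)] else result) []

-- ===== PORT B =====
-- Source B's while-loop as fuel recursion; fuel S.toNat + 1 suffices (the guard d*d ≤ S with d ≥ 1 forces d ≤ S)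
def remov_nb_altLoop (n S : Int) : Nat → Int → List (Int × Int) → List (Int × Int) → List (Int × Int) × List (Int × Int)
  | 0, _, small, big => (small, big)
  | fuel + 1, d, small, big =>
    if d * d ≤ S ∧ d ≤ n + 1 then
      if PySem.Int.mod S d = 0 then
        let q := PySem.Int.floordiv S d
        let small' := if 2 ≤ d ∧ d ≤ n + 1 ∧ q ≤ n + 1 then small ++ [(d - 1, q - 1)] else small
        let big' := if q ≠ d ∧ 2 ≤ q ∧ q ≤ n + 1 ∧ d ≤ n + 1 then big ++ [(q - 1, d - 1)] else big
        remov_nb_altLoop n S fuel (d + 1) small' big'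
      else remov_nb_altLoop n S fuel (d + 1) small big
    else (small, big)

def remov_nb_alt (n : Int) : List (Int × Int) :=
  let S := PySem.Int.floordiv (n * (n + 1)) 2 + 1
  let r := remov_nb_altLoop n S (S.toNat + 1) 1 [] []
  r.1 ++ r.2.reverse

-- ===== PRECONDITION & SPEC =====
def Spec_remov_nb (n : Int) (out : List (Int × Int)) : Prop := out = remov_nb_alt n
instance (n : Int) (out : List (Int × Int)) : Decidable (Spec_remov_nb n out) := by unfold Spec_remov_nb; infer_instance

-- ===== CLAIM (what is proved, stated in full; the proofs are below) =====
def Claim_equal_remov_nb : Prop := ∀ (n : Int), Dom_remov_nb n → Spec_remov_nb n (remov_nb n)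

-- ===== LEMMAS AND PROOFS =====

-- proof-side mirrors of Source B's two accumulators, as self-contained recursions over d
def pvSmalls (n S d : Int) : List (Int × Int) :=
  if h : 1 ≤ d ∧ d * d ≤ S ∧ d ≤ n + 1 then
    (if d ∣ S ∧ 2 ≤ d ∧ d ≤ n + 1 ∧ S / d ≤ n + 1 then [(d - 1, S / d - 1)] else []) ++
      pvSmalls n S (d + 1)
  else []
termination_by (S + 1 - d).toNat
decreasing_by
  have hd : d ≤ d * d := le_mul_of_one_le_left (by omega) h.1
  have : d ≤ S := hd.trans h.2.1
  omega

def pvBigs (n S d : Int) : List (Int × Int) :=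
  if h : 1 ≤ d ∧ d * d ≤ S ∧ d ≤ n + 1 then
    (if d ∣ S ∧ (S / d ≠ d ∧ 2 ≤ S / d ∧ S / d ≤ n + 1 ∧ d ≤ n + 1) then [(S / d - 1, d - 1)] else []) ++
      pvBigs n S (d + 1)
  else []
termination_by (S + 1 - d).toNat
decreasing_by
  have hd : d ≤ d * d := le_mul_of_one_le_left (by omega) h.1
  have : d ≤ S := hd.trans h.2.1
  omega

theorem pv_altLoop_eq (n S : Int) : ∀ (fuel : Nat) (d : Int) (small big : List (Int × Int)),
    1 ≤ d → S < d + fuel →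
    remov_nb_altLoop n S fuel d small big = (small ++ pvSmalls n S d, big ++ pvBigs n S d) := by
  intro fuel
  induction fuel with
  | zero =>
    intro d small big hd hlt
    have hng : ¬ (1 ≤ d ∧ d * d ≤ S ∧ d ≤ n + 1) := by
      rintro ⟨h1, h2, -⟩
      have : d ≤ d * d := le_mul_of_one_le_left (by omega) h1
      omega
    rw [pvSmalls, pvBigs, remov_nb_altLoop]
    simp [dif_neg hng]
  | succ fuel ih =>
    intro d small big hd hlt
    rw [remov_nb_altLoop]
    by_cases hg : d * d ≤ S ∧ d ≤ n + 1
    · rw [if_pos hg]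
      have hstep : pvSmalls n S d =
          (if d ∣ S ∧ 2 ≤ d ∧ d ≤ n + 1 ∧ S / d ≤ n + 1 then [(d - 1, S / d - 1)] else []) ++
            pvSmalls n S (d + 1) := by
        rw [pvSmalls]; rw [dif_pos ⟨hd, hg.1, hg.2⟩]
      have hstepB : pvBigs n S d =
          (if d ∣ S ∧ (S / d ≠ d ∧ 2 ≤ S / d ∧ S / d ≤ n + 1 ∧ d ≤ n + 1) then [(S / d - 1, d - 1)] else []) ++
            pvBigs n S (d + 1) := by
        rw [pvBigs]; rw [dif_pos ⟨hd, hg.1, hg.2⟩]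
      by_cases hm : PySem.Int.mod S d = 0
      · rw [if_pos hm]
        have hdvd : d ∣ S := (PySem.Int.mod_eq_zero_iff_dvd S d).1 hm
        have hq : PySem.Int.floordiv S d = S / d := PySem.Int.floordiv_eq_ediv_of_pos (by omega)
        simp only [hq]
        rw [ih (d + 1) _ _ (by omega) (by omega)]
        rw [hstep, hstepB]
        simp only [hdvd, true_and]
        split_ifs <;> simp
      · rw [if_neg hm]
        have hnd : ¬ d ∣ S := fun h => hm ((PySem.Int.mod_eq_zero_iff_dvd S d).2 h)
        rw [ih (d + 1) _ _ (by omega) (by omega), hstep, hstepB]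
        rw [if_neg (by tauto), if_neg (by tauto)]
        simp
    · rw [if_neg hg]
      rw [pvSmalls, pvBigs]
      have hng : ¬ (1 ≤ d ∧ d * d ≤ S ∧ d ≤ n + 1) := by tauto
      simp [dif_neg hng]

def pvCanon (n S : Int) (p : Int × Int) : Prop :=
  ∃ x, 1 ≤ x ∧ x < n + 1 ∧ (x + 1) ∣ S ∧ S / (x + 1) ≤ n + 1 ∧ p = (x, S / (x + 1) - 1)

theorem pv_mem_pvSmalls (n S : Int) : ∀ (k : Nat) (d : Int), (S + 1 - d).toNat ≤ k → 1 ≤ d →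
    ∀ p : Int × Int, (p ∈ pvSmalls n S d ↔
      ∃ e, d ≤ e ∧ e * e ≤ S ∧ e ∣ S ∧ 2 ≤ e ∧ e ≤ n + 1 ∧ S / e ≤ n + 1 ∧ p = (e - 1, S / e - 1)) := by
  intro k
  induction k with
  | zero =>
    intro d hk hd p
    have hng : ¬ (1 ≤ d ∧ d * d ≤ S ∧ d ≤ n + 1) := by
      rintro ⟨h1, h2, -⟩
      have : d ≤ d * d := le_mul_of_one_le_left (by omega) h1
      omega
    rw [pvSmalls, dif_neg hng]
    simp only [List.not_mem_nil, false_iff]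
    rintro ⟨e, he1, he2, -⟩
    have : e ≤ e * e := le_mul_of_one_le_left (by omega) (by omega)
    omega
  | succ k ih =>
    intro d hk hd p
    by_cases hg : d * d ≤ S ∧ d ≤ n + 1
    · have hdd : d ≤ d * d := le_mul_of_one_le_left (by omega) hd
      rw [pvSmalls, dif_pos ⟨hd, hg.1, hg.2⟩]
      rw [List.mem_append, ih (d + 1) (by omega) (by omega) p]
      constructor
      · rintro (hp | ⟨e, he0, he⟩)
        · by_cases hc : d ∣ S ∧ 2 ≤ d ∧ d ≤ n + 1 ∧ S / d ≤ n + 1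
          · rw [if_pos hc] at hp
            simp only [List.mem_singleton] at hp
            exact ⟨d, le_refl d, hg.1, hc.1, hc.2.1, hc.2.2.1, hc.2.2.2, hp⟩
          · rw [if_neg hc] at hp; simp at hp
        · exact ⟨e, by omega, he⟩
      · rintro ⟨e, he1, he2, he3, he4, he5, he6, he7⟩
        by_cases hde : e = d
        · subst hde
          left
          rw [if_pos ⟨he3, he4, he5, he6⟩]
          simp [he7]
        · right; exact ⟨e, by omega, he2, he3, he4, he5, he6, he7⟩
    · have hng : ¬ (1 ≤ d ∧ d * d ≤ S ∧ d ≤ n + 1) := by tauto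
      rw [pvSmalls, dif_neg hng]
      simp only [List.not_mem_nil, false_iff]
      rintro ⟨e, he1, he2, -, -, he5, -, -⟩
      have h1 : d ≤ d * d := le_mul_of_one_le_left (by omega) hd
      have h2 : e ≤ e * e := le_mul_of_one_le_left (by omega) (by omega)
      have h3 : d * d ≤ e * e := by nlinarith
      rcases not_and_or.1 hg with h | h <;> omega

theorem pv_mem_pvBigs (n S : Int) : ∀ (k : Nat) (d : Int), (S + 1 - d).toNat ≤ k → 1 ≤ d →
    ∀ p : Int × Int, (p ∈ pvBigs n S d ↔
      ∃ e, d ≤ e ∧ e * e ≤ S ∧ e ∣ S ∧ S / e ≠ e ∧ 2 ≤ S / e ∧ S / e ≤ n + 1 ∧ e ≤ n + 1 ∧ p = (S / e - 1, e - 1)) := by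
  intro k
  induction k with
  | zero =>
    intro d hk hd p
    have hng : ¬ (1 ≤ d ∧ d * d ≤ S ∧ d ≤ n + 1) := by
      rintro ⟨h1, h2, -⟩
      have : d ≤ d * d := le_mul_of_one_le_left (by omega) h1
      omega
    rw [pvBigs, dif_neg hng]
    simp only [List.not_mem_nil, false_iff]
    rintro ⟨e, he1, he2, -⟩
    have : e ≤ e * e := le_mul_of_one_le_left (by omega) (by omega)
    omega
  | succ k ih =>
    intro d hk hd p
    by_cases hg : d * d ≤ S ∧ d ≤ n + 1
    · have hdd : d ≤ d * d := le_mul_of_one_le_left (by omega) hd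
      rw [pvBigs, dif_pos ⟨hd, hg.1, hg.2⟩]
      rw [List.mem_append, ih (d + 1) (by omega) (by omega) p]
      constructor
      · rintro (hp | ⟨e, he0, he⟩)
        · by_cases hc : d ∣ S ∧ (S / d ≠ d ∧ 2 ≤ S / d ∧ S / d ≤ n + 1 ∧ d ≤ n + 1)
          · rw [if_pos hc] at hp
            simp only [List.mem_singleton] at hp
            exact ⟨d, le_refl d, hg.1, hc.1, hc.2.1, hc.2.2.1, hc.2.2.2.1, hc.2.2.2.2, hp⟩
          · rw [if_neg hc] at hp; simp at hp
        · exact ⟨e, by omega, he⟩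
      · rintro ⟨e, he1, he2, he3, he4, he5, he6, he7, he8⟩
        by_cases hde : e = d
        · subst hde
          left
          rw [if_pos ⟨he3, he4, he5, he6, he7⟩]
          simp [he8]
        · right; exact ⟨e, by omega, he2, he3, he4, he5, he6, he7, he8⟩
    · have hng : ¬ (1 ≤ d ∧ d * d ≤ S ∧ d ≤ n + 1) := by tauto
      rw [pvBigs, dif_neg hng]
      simp only [List.not_mem_nil, false_iff]
      rintro ⟨e, he1, he2, -, -, -, -, he7, -⟩
      have h1 : d ≤ d * d := le_mul_of_one_le_left (by omega) hd
      have h2 : e ≤ e * e := le_mul_of_one_le_left (by omega) (by omega)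
      have h3 : d * d ≤ e * e := by nlinarith
      rcases not_and_or.1 hg with h | h <;> omega

theorem pv_pairwise_pvSmalls (n S : Int) : ∀ (k : Nat) (d : Int), (S + 1 - d).toNat ≤ k → 1 ≤ d →
    (pvSmalls n S d).Pairwise (fun p q => p.1 < q.1) := by
  intro k
  induction k with
  | zero =>
    intro d hk hd
    have hng : ¬ (1 ≤ d ∧ d * d ≤ S ∧ d ≤ n + 1) := by
      rintro ⟨h1, h2, -⟩
      have : d ≤ d * d := le_mul_of_one_le_left (by omega) h1
      omega
    rw [pvSmalls, dif_neg hng]; exact List.Pairwise.nil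
  | succ k ih =>
    intro d hk hd
    by_cases hg : d * d ≤ S ∧ d ≤ n + 1
    · have hdd : d ≤ d * d := le_mul_of_one_le_left (by omega) hd
      rw [pvSmalls, dif_pos ⟨hd, hg.1, hg.2⟩]
      refine List.pairwise_append.2 ⟨?_, ih (d + 1) (by omega) (by omega), ?_⟩
      · split_ifs <;> simp
      · intro p hp q hq
        have hp1 : p.1 = d - 1 := by
          by_cases hc : d ∣ S ∧ 2 ≤ d ∧ d ≤ n + 1 ∧ S / d ≤ n + 1
          · rw [if_pos hc] at hp; simp only [List.mem_singleton] at hp; rw [hp]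
          · rw [if_neg hc] at hp; simp at hp
        obtain ⟨e, he1, -, -, -, -, -, hq1⟩ :=
          (pv_mem_pvSmalls n S k (d + 1) (by omega) (by omega) q).1 hq
        rw [hp1, hq1]; simp; omega
    · have hng : ¬ (1 ≤ d ∧ d * d ≤ S ∧ d ≤ n + 1) := by tauto
      rw [pvSmalls, dif_neg hng]; exact List.Pairwise.nil

theorem pv_pairwise_pvBigs (n S : Int) : ∀ (k : Nat) (d : Int), (S + 1 - d).toNat ≤ k → 1 ≤ d →
    (pvBigs n S d).Pairwise (fun p q => q.1 < p.1) := by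
  intro k
  induction k with
  | zero =>
    intro d hk hd
    have hng : ¬ (1 ≤ d ∧ d * d ≤ S ∧ d ≤ n + 1) := by
      rintro ⟨h1, h2, -⟩
      have : d ≤ d * d := le_mul_of_one_le_left (by omega) h1
      omega
    rw [pvBigs, dif_neg hng]; exact List.Pairwise.nil
  | succ k ih =>
    intro d hk hd
    by_cases hg : d * d ≤ S ∧ d ≤ n + 1
    · have hdd : d ≤ d * d := le_mul_of_one_le_left (by omega) hd
      rw [pvBigs, dif_pos ⟨hd, hg.1, hg.2⟩]
      refine List.pairwise_append.2 ⟨?_, ih (d + 1) (by omega) (by omega), ?_⟩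
      · split_ifs <;> simp
      · intro p hp q hq
        by_cases hc : d ∣ S ∧ (S / d ≠ d ∧ 2 ≤ S / d ∧ S / d ≤ n + 1 ∧ d ≤ n + 1)
        · rw [if_pos hc] at hp
          simp only [List.mem_singleton] at hp
          obtain ⟨e, he1, he2, he3, -, -, -, -, hq1⟩ :=
            (pv_mem_pvBigs n S k (d + 1) (by omega) (by omega) q).1 hq
          have ha : S / d * d = S := Int.ediv_mul_cancel hc.1
          have hb : S / e * e = S := Int.ediv_mul_cancel he3
          have hS1 : 1 ≤ S := by omega
          have hbe : 1 ≤ S / e := by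
            rw [Int.le_ediv_iff_mul_le (by omega)]
            simpa using Int.le_of_dvd (by omega) he3
          have : S / e < S / d := by
            by_contra hcon
            push_neg at hcon
            nlinarith
          rw [hp, hq1]
          simpa using by omega
        · rw [if_neg hc] at hp; simp at hp
    · have hng : ¬ (1 ≤ d ∧ d * d ≤ S ∧ d ≤ n + 1) := by tauto
      rw [pvBigs, dif_neg hng]; exact List.Pairwise.nil

-- A's per-step derived y equals S // (x+1) - 1 (S = summ + 1)
theorem pv_y_eq (s x : Int) (hx : 0 < x + 1) :
    (s - x) / (x + 1) = (s + 1) / (x + 1) - 1 := by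
  have h : s - x = (s + 1) + (-1) * (x + 1) := by ring
  rw [h, Int.add_mul_ediv_right _ _ (by omega : x + 1 ≠ 0)]; ring

-- A's verification equation is divisibility of S by x+1
theorem pv_cond_iff (s x : Int) (_hx : 0 < x + 1) :
    (x * ((s + 1) / (x + 1) - 1) = s - x - ((s + 1) / (x + 1) - 1)) ↔ (x + 1) ∣ (s + 1) := by
  constructor
  · intro h
    exact ⟨(s + 1) / (x + 1), by linarith [h]⟩
  · intro h
    have hc := Int.ediv_mul_cancel h
    nlinarith [hc]

theorem pv_remov_nb_eq (n : Int) :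
    remov_nb n = ((PySem.List.pyRange 1 (n + 1) 1).filter (fun x =>
        decide (PySem.Int.floordiv (PySem.Int.floordiv (n * (n + 1)) 2 - x) (x + 1) ≤ n ∧
          x * PySem.Int.floordiv (PySem.Int.floordiv (n * (n + 1)) 2 - x) (x + 1) =
            PySem.Int.floordiv (n * (n + 1)) 2 - x -
              PySem.Int.floordiv (PySem.Int.floordiv (n * (n + 1)) 2 - x) (x + 1)))).map
      (fun x => (x, PySem.Int.floordiv (PySem.Int.floordiv (n * (n + 1)) 2 - x) (x + 1))) := by
  unfold remov_nb
  rw [PySem.List.foldl_append_ite]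
  simp

theorem pv_mem_remov_nb (n : Int) (p : Int × Int) :
    p ∈ remov_nb n ↔ pvCanon n (n * (n + 1) / 2 + 1) p := by
  rw [pv_remov_nb_eq]
  simp only [List.mem_map, List.mem_filter, PySem.List.mem_pyRange_one, decide_eq_true_eq]
  unfold pvCanon
  constructor
  · rintro ⟨x, ⟨⟨hx1, hx2⟩, hy, heq⟩, hp⟩
    have hxp : (0:Int) < x + 1 := by omega
    have hfd : PySem.Int.floordiv (n * (n + 1)) 2 = n * (n + 1) / 2 :=
      PySem.Int.floordiv_eq_ediv_of_pos (by norm_num)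
    have hfd2 : PySem.Int.floordiv (PySem.Int.floordiv (n * (n + 1)) 2 - x) (x + 1)
        = (n * (n + 1) / 2 + 1) / (x + 1) - 1 := by
      rw [PySem.Int.floordiv_eq_ediv_of_pos hxp, hfd, pv_y_eq _ _ hxp]
    rw [hfd2] at hp hy heq
    rw [hfd] at heq
    refine ⟨x, hx1, hx2, ?_, by omega, by rw [← hp]⟩
    exact (pv_cond_iff (n * (n + 1) / 2) x hxp).1 heq
  · rintro ⟨x, hx1, hx2, hdvd, hle, hp⟩
    have hxp : (0:Int) < x + 1 := by omega
    have hfd : PySem.Int.floordiv (n * (n + 1)) 2 = n * (n + 1) / 2 :=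
      PySem.Int.floordiv_eq_ediv_of_pos (by norm_num)
    have hfd2 : PySem.Int.floordiv (PySem.Int.floordiv (n * (n + 1)) 2 - x) (x + 1)
        = (n * (n + 1) / 2 + 1) / (x + 1) - 1 := by
      rw [PySem.Int.floordiv_eq_ediv_of_pos hxp, hfd, pv_y_eq _ _ hxp]
    refine ⟨x, ⟨⟨hx1, hx2⟩, ?_, ?_⟩, ?_⟩
    · rw [hfd2]; omega
    · rw [hfd2, hfd]
      exact (pv_cond_iff (n * (n + 1) / 2) x hxp).2 hdvd
    · rw [hfd2, hp]

theorem pv_pairwise_remov_nb (n : Int) :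
    (remov_nb n).Pairwise (fun p q : Int × Int => p.1 < q.1) := by
  rw [pv_remov_nb_eq]
  refine List.Pairwise.map _ ?_ (List.Pairwise.filter _ (PySem.List.pairwise_lt_pyRange_one 1 (n+1)))
  intro a b hab
  simpa using hab

theorem pv_alt_eq (n S : Int) (hS : 1 ≤ S) (hfd : PySem.Int.floordiv (n * (n + 1)) 2 + 1 = S) :
    remov_nb_alt n = pvSmalls n S 1 ++ (pvBigs n S 1).reverse := by
  unfold remov_nb_alt
  simp only [hfd]
  rw [pv_altLoop_eq n S _ 1 [] [] (by norm_num) (by omega)]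
  simp

theorem pv_div_eq (S c e : Int) (hc : c ≠ 0) (h : c * e = S) : S / c = e := by
  subst h; exact Int.mul_ediv_cancel_left e hc

theorem pv_mem_alt (n : Int) (hS : 1 ≤ n * (n + 1) / 2 + 1) (p : Int × Int) :
    p ∈ remov_nb_alt n ↔ pvCanon n (n * (n + 1) / 2 + 1) p := by
  have hfd : PySem.Int.floordiv (n * (n + 1)) 2 + 1 = n * (n + 1) / 2 + 1 := by
    rw [PySem.Int.floordiv_eq_ediv_of_pos (by norm_num : (0:Int) < 2)]
  generalize hSdef : n * (n + 1) / 2 + 1 = S at hS hfd ⊢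
  rw [pv_alt_eq n S hS hfd]
  rw [List.mem_append, List.mem_reverse,
      pv_mem_pvSmalls n S (S + 1 - 1).toNat 1 (le_refl _) (by norm_num) p,
      pv_mem_pvBigs n S (S + 1 - 1).toNat 1 (le_refl _) (by norm_num) p]
  unfold pvCanon
  constructor
  · rintro (⟨e, he1, he2, he3, he4, he5, he6, he7⟩ | ⟨e, he1, he2, he3, he4, he5, he6, he7, he8⟩)
    · refine ⟨e - 1, by omega, by omega, ?_, ?_, ?_⟩ <;>
        rw [show e - 1 + 1 = e by ring]
      · exact he3
      · exact he6
      · exact he7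
    · have hb : S / e * e = S := Int.ediv_mul_cancel he3
      refine ⟨S / e - 1, by omega, by omega, ?_, ?_, ?_⟩ <;>
        rw [show S / e - 1 + 1 = S / e by ring]
      · exact ⟨e, hb.symm⟩
      · rw [pv_div_eq S (S / e) e (by omega) hb]
        exact he7
      · rw [pv_div_eq S (S / e) e (by omega) hb]
        exact he8
  · rintro ⟨x, hx1, hx2, hdvd, hle, hp⟩
    have hq : S / (x + 1) * (x + 1) = S := Int.ediv_mul_cancel hdvd
    have hq1 : 1 ≤ S / (x + 1) := by
      rw [Int.le_ediv_iff_mul_le (by omega)]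
      simpa using Int.le_of_dvd (by omega) hdvd
    by_cases hsq : (x + 1) * (x + 1) ≤ S
    · left
      refine ⟨x + 1, by omega, hsq, hdvd, by omega, by omega, hle, ?_⟩
      rw [hp]; simp
    · right
      have hqlt : S / (x + 1) < x + 1 := by nlinarith
      have hq2 : S / (x + 1) * (S / (x + 1)) ≤ S := by nlinarith
      have hSq : S / (S / (x + 1)) = x + 1 := pv_div_eq S (S / (x + 1)) (x + 1) (by omega) hq
      refine ⟨S / (x + 1), by omega, hq2, ⟨x + 1, hq.symm⟩, ?_, ?_, ?_, by omega, ?_⟩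
      · rw [hSq]; omega
      · rw [hSq]; omega
      · rw [hSq]; omega
      · rw [hp, hSq]; simp
  
theorem pv_pairwise_alt (n : Int) (hS : 1 ≤ n * (n + 1) / 2 + 1) :
    (remov_nb_alt n).Pairwise (fun p q : Int × Int => p.1 < q.1) := by
  have hfd : PySem.Int.floordiv (n * (n + 1)) 2 + 1 = n * (n + 1) / 2 + 1 := by
    rw [PySem.Int.floordiv_eq_ediv_of_pos (by norm_num : (0:Int) < 2)]
  generalize hSdef : n * (n + 1) / 2 + 1 = S at hS hfd ⊢
  rw [pv_alt_eq n S hS hfd]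
  refine List.pairwise_append.2
    ⟨pv_pairwise_pvSmalls n S (S + 1 - 1).toNat 1 (le_refl _) (by norm_num), ?_, ?_⟩
  · rw [List.pairwise_reverse]
    exact pv_pairwise_pvBigs n S (S + 1 - 1).toNat 1 (le_refl _) (by norm_num)
  · intro p hp q hq
    rw [List.mem_reverse] at hq
    obtain ⟨d, hd1, hd2, -, -, -, -, hp1⟩ :=
      (pv_mem_pvSmalls n S (S + 1 - 1).toNat 1 (le_refl _) (by norm_num) p).1 hp
    obtain ⟨e, he1, he2, he3, he4, -, -, -, hq1⟩ :=
      (pv_mem_pvBigs n S (S + 1 - 1).toNat 1 (le_refl _) (by norm_num) q).1 hq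
    have hb : S / e * e = S := Int.ediv_mul_cancel he3
    have hbe : 1 ≤ S / e := by
      rw [Int.le_ediv_iff_mul_le (by omega)]
      simpa using Int.le_of_dvd (by omega) he3
    have hlt : e < S / e := by
      rcases lt_trichotomy e (S / e) with h | h | h
      · exact h
      · exact absurd h.symm he4
      · nlinarith
    have : d < S / e := by nlinarith
    rw [hp1, hq1]
    simpa using by omega

-- ===== VERDICT (by name: the statement is the Claim_ definition above) =====
theorem remov_nb_spec : Claim_equal_remov_nb := by
  intro n _
  unfold Spec_remov_nb
  have hS : 1 ≤ n * (n + 1) / 2 + 1 := by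
    have h0 : 0 ≤ n * (n + 1) := by
      by_cases h : 0 ≤ n
      · exact mul_nonneg h (by omega)
      · exact Int.mul_nonneg_of_nonpos_of_nonpos (by omega) (by omega)
    have := Int.ediv_nonneg h0 (by norm_num : (0:Int) ≤ 2)
    omega
  have hmem : ∀ p, p ∈ remov_nb n ↔ p ∈ remov_nb_alt n := fun p =>
    (pv_mem_remov_nb n p).trans (pv_mem_alt n hS p).symm
  have hpA := pv_pairwise_remov_nb n
  have hpB := pv_pairwise_alt n hS
  have hndA : (remov_nb n).Nodup := hpA.imp (fun h => by intro he; rw [he] at h; omega)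
  have hndB : (remov_nb_alt n).Nodup := hpB.imp (fun h => by intro he; rw [he] at h; omega)
  have hperm : (remov_nb n).Perm (remov_nb_alt n) := (List.perm_ext_iff_of_nodup hndA hndB).2 hmem
  have h1 := PySem.List.sorted_eq_of_perm_of_pairwise_lt (remov_nb_alt n) (remov_nb n) (fun p => p.1) hperm hpA
  have h2 := PySem.List.sorted_eq_of_perm_of_pairwise_lt (remov_nb_alt n) (remov_nb_alt n) (fun p => p.1) (List.Perm.refl _) hpB
  rw [← h1, h2]
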